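-- pv_equiv track=rewrite | github.com/MiSTeR1995/BDCC_2025 | src/utils/search_utils.py | _ordered_keys_ds
-- ===== SOURCE A (Python) =====
-- from typing import Any
--
-- METRIC_ORDER = [
--     "UAR", "MF1",    # базовые
--     "mUAR", "mF1",   # если тренер дублирует такими именами
-- ]
--
-- def _ordered_keys_ds(ds: dict[str, Any]) -> list[str]:
--     """То же для блока датасетов (без поля name)."""
--     base = [k for k in METRIC_ORDER if k in ds and k != "name"]
--     recalls = sorted(k for k in ds.keys() if k.startswith("recall_") and k != "name")
--     rest = sorted(
--         k for k in ds.keys()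
--         if k not in METRIC_ORDER and not k.startswith("recall_") and k != "name"
--     )
--     return base + recalls + rest
-- ===== SOURCE B (Python) =====
-- METRIC_ORDER = [
--     "UAR", "MF1",
--     "mUAR", "mF1",
-- ]
--
-- def _ordered_keys_ds(ds):
--     def rank(k):
--         if k in METRIC_ORDER:
--             return (METRIC_ORDER.index(k), "")
--         if k.startswith("recall_"):
--             return (len(METRIC_ORDER), k)
--         return (len(METRIC_ORDER) + 1, k)
--     return sorted((k for k in ds if k != "name"), key=rank)
-- ===== Notes on version B (the rewrite author's own statement) =====
-- stated objective: simpler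
-- what changed: Replaced A's three separate filtered passes (METRIC_ORDER scan, sorted recall_ keys, sorted rest) plus list concatenation by a single stable sort of all non-'name' keys under one (bucket/index, string) tuple key.
import Mathlib
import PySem

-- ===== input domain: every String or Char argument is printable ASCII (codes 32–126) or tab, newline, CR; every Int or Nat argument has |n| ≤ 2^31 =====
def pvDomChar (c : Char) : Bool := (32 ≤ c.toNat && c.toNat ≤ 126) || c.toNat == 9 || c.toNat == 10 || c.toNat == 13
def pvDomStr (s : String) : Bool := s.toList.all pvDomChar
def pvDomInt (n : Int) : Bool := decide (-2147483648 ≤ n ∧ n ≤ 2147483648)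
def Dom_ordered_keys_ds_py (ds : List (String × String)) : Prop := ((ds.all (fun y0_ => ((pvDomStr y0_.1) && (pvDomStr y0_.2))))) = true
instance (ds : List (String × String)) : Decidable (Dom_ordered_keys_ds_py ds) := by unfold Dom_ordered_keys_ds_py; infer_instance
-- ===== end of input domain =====

-- B replaces A's three filtered passes + concatenation by one keyed sort over all non-"name"
-- keys (objective: simpler / more idiomatic; not claimed faster).


def METRIC_ORDER_py : List String := ["UAR", "MF1", "mUAR", "mF1"]

-- ===== PORT A =====
def ordered_keys_ds_py (ds : List (String × String)) : List String :=
  let keys := (PySem.Dict.ofList ds).keys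
  let base := METRIC_ORDER_py.filter (fun k => keys.contains k && k != "name")
  let recalls := PySem.List.sorted (keys.filter (fun k => PySem.Str.startswith k "recall_" && k != "name")) (fun x => x) false
  let rest := PySem.List.sorted (keys.filter (fun k => !(METRIC_ORDER_py.contains k) && !(PySem.Str.startswith k "recall_") && k != "name")) (fun x => x) false
  base ++ recalls ++ rest

-- ===== PORT B =====
-- rank(k) from Source B: Python's 2-tuple (int, str) sort key; Lean's lexicographic pair Int ×ₗ String
-- compares exactly as Python compares these tuples.
def pvRank (k : String) : Int ×ₗ String :=
  if METRIC_ORDER_py.contains k then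
    toLex ((((PySem.List.index? METRIC_ORDER_py k).getD 0 : Nat) : Int), "")
  else if PySem.Str.startswith k "recall_" then
    toLex ((METRIC_ORDER_py.length : Int), k)
  else
    toLex ((METRIC_ORDER_py.length : Int) + 1, k)

def ordered_keys_ds_py_alt (ds : List (String × String)) : List String :=
  PySem.List.sorted (((PySem.Dict.ofList ds).keys).filter (fun k => k != "name")) pvRank false

-- ===== PRECONDITION & SPEC =====
def Spec_ordered_keys_ds_py (ds : List (String × String)) (out : List String) : Prop := out = ordered_keys_ds_py_alt ds
instance (ds : List (String × String)) (out : List String) : Decidable (Spec_ordered_keys_ds_py ds out) := by unfold Spec_ordered_keys_ds_py; infer_instance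

-- ===== CLAIM (what is proved, stated in full; the proofs are below) =====
def Claim_equal_ordered_keys_ds_py : Prop := ∀ (ds : List (String × String)), Dom_ordered_keys_ds_py ds → Spec_ordered_keys_ds_py ds (ordered_keys_ds_py ds)

-- ===== LEMMAS AND PROOFS =====
lemma mem_MO (k : String) (h : METRIC_ORDER_py.contains k = true) :
    k = "UAR" ∨ k = "MF1" ∨ k = "mUAR" ∨ k = "mF1" := by
  simpa [METRIC_ORDER_py] using h

lemma startswith_MO (k : String) (h : METRIC_ORDER_py.contains k = true) :
    PySem.Str.startswith k "recall_" = false := by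
  rcases mem_MO k h with h | h | h | h <;> subst h <;> decide

lemma not_MO_of_startswith (k : String) (h : PySem.Str.startswith k "recall_" = true) :
    METRIC_ORDER_py.contains k = false := by
  by_contra hc
  rw [Bool.not_eq_false] at hc
  rw [startswith_MO k hc] at h
  exact Bool.false_ne_true h

lemma rank_MO (k : String) (h : k ∈ METRIC_ORDER_py) :
    ∃ i : Int, pvRank k = toLex (i, "") ∧ i < 4 := by
  simp only [METRIC_ORDER_py, List.mem_cons, List.not_mem_nil, or_false] at h
  rcases h with h | h | h | h <;> subst h
  · exact ⟨0, by decide, by norm_num⟩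
  · exact ⟨1, by decide, by norm_num⟩
  · exact ⟨2, by decide, by norm_num⟩
  · exact ⟨3, by decide, by norm_num⟩

lemma rank_recall (k : String) (h : PySem.Str.startswith k "recall_" = true) :
    pvRank k = toLex (4, k) := by
  unfold pvRank
  rw [not_MO_of_startswith k h, h]
  norm_num [METRIC_ORDER_py]

lemma rank_rest (k : String) (h0 : METRIC_ORDER_py.contains k = false)
    (h1 : PySem.Str.startswith k "recall_" = false) :
    pvRank k = toLex (5, k) := by
  unfold pvRank
  rw [h0, h1]
  norm_num [METRIC_ORDER_py]

lemma MO_pairwise : METRIC_ORDER_py.Pairwise (fun a b => pvRank a < pvRank b) := by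
  decide

lemma main_eq (kl : List String) (h : kl.Nodup) :
    METRIC_ORDER_py.filter (fun k => kl.contains k && k != "name")
      ++ PySem.List.sorted (kl.filter (fun k => PySem.Str.startswith k "recall_" && k != "name")) (fun x => x) false
      ++ PySem.List.sorted (kl.filter (fun k => !(METRIC_ORDER_py.contains k) && !(PySem.Str.startswith k "recall_") && k != "name")) (fun x => x) false
    = PySem.List.sorted (kl.filter (fun k => k != "name")) pvRank false := by
  refine (PySem.List.sorted_eq_of_perm_of_pairwise_lt _ _ pvRank ?_ ?_).symm
  · -- permutation: split filter into the three buckets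
    have h1 : (kl.filter (fun k => k != "name")).Perm
        ((kl.filter (fun k => METRIC_ORDER_py.contains k && (k != "name")))
          ++ ((kl.filter (fun k => PySem.Str.startswith k "recall_" && (!(METRIC_ORDER_py.contains k) && (k != "name"))))
            ++ (kl.filter (fun k => !(PySem.Str.startswith k "recall_") && (!(METRIC_ORDER_py.contains k) && (k != "name")))))) := by
      have p1 := (List.filter_append_perm (fun k => METRIC_ORDER_py.contains k) (kl.filter (fun k => k != "name"))).symm
      have p2 := (List.filter_append_perm (fun k => PySem.Str.startswith k "recall_")
        ((kl.filter (fun k => k != "name")).filter (fun k => !(METRIC_ORDER_py.contains k)))).symm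
      simp only [List.filter_filter] at p1 p2
      exact p1.trans (List.Perm.append_left _ p2)
    refine List.Perm.trans ?_ h1.symm
    rw [List.append_assoc]
    refine List.Perm.append ?_ (List.Perm.append ?_ ?_)
    · -- base
      refine (List.perm_ext_iff_of_nodup ?_ ?_).2 ?_
      · exact List.Nodup.filter _ (by decide)
      · exact List.Nodup.filter _ h
      · intro a
        simp only [List.mem_filter, METRIC_ORDER_py, Bool.and_eq_true, List.contains_iff_mem]
        tauto
    · -- recalls
      refine (PySem.List.sorted_perm _ _ _).trans (List.Perm.of_eq (List.filter_congr ?_))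
      intro k _
      cases hr : PySem.Str.startswith k "recall_"
      · simp
      · rw [not_MO_of_startswith k hr]
        simp
    · -- rest
      refine (PySem.List.sorted_perm _ _ _).trans (List.Perm.of_eq (List.filter_congr ?_))
      intro k _
      cases hr : PySem.Str.startswith k "recall_" <;> cases hm : METRIC_ORDER_py.contains k <;> simp
  · -- pairwise
    have hbase : ∀ a ∈ METRIC_ORDER_py.filter (fun k => kl.contains k && k != "name"),
        ∃ i : Int, pvRank a = toLex (i, "") ∧ i < 4 := by
      intro a ha
      exact rank_MO a (List.mem_filter.1 ha).1
    have hrec : ∀ a ∈ PySem.List.sorted (kl.filter (fun k => PySem.Str.startswith k "recall_" && k != "name")) (fun x => x) false,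
        pvRank a = toLex (4, a) := by
      intro a ha
      rw [PySem.List.mem_sorted] at ha
      exact rank_recall a (Bool.and_eq_true_iff.1 (List.mem_filter.1 ha).2).1
    have hrest : ∀ a ∈ PySem.List.sorted (kl.filter (fun k => !(METRIC_ORDER_py.contains k) && !(PySem.Str.startswith k "recall_") && k != "name")) (fun x => x) false,
        pvRank a = toLex (5, a) := by
      intro a ha
      rw [PySem.List.mem_sorted] at ha
      have := (List.mem_filter.1 ha).2
      simp only [Bool.and_eq_true, Bool.not_eq_true'] at this
      exact rank_rest a this.1.1 this.1.2
    have hPsorted : ∀ (p : String → Bool) (c : Int),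
        (∀ a ∈ PySem.List.sorted (kl.filter p) (fun x => x) false, pvRank a = toLex (c, a)) →
        (PySem.List.sorted (kl.filter p) (fun x => x) false).Pairwise (fun a b => pvRank a < pvRank b) := by
      intro p c hval
      have hs := PySem.List.sorted_pairwise (kl.filter p) (fun x => x)
      have hn : (PySem.List.sorted (kl.filter p) (fun x => x) false).Nodup :=
        List.Perm.nodup (PySem.List.sorted_perm (kl.filter p) (fun x => x) false).symm
          (List.Nodup.filter p h)
      have hcomb := List.Pairwise.and hs hn
      refine List.Pairwise.imp_of_mem ?_ hcomb
      intro a b ha hb hab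
      rw [hval a ha, hval b hb, Prod.Lex.toLex_lt_toLex]
      exact Or.inr ⟨rfl, lt_of_le_of_ne hab.1 hab.2⟩
    rw [List.append_assoc, List.pairwise_append]
    refine ⟨?_, ?_, ?_⟩
    · exact List.Pairwise.sublist List.filter_sublist MO_pairwise
    · rw [List.pairwise_append]
      refine ⟨hPsorted _ 4 hrec, hPsorted _ 5 hrest, ?_⟩
      intro a ha b hb
      rw [hrec a ha, hrest b hb, Prod.Lex.toLex_lt_toLex]
      exact Or.inl (by norm_num)
    · intro a ha b hb
      obtain ⟨i, hval, hi⟩ := hbase a ha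
      rcases List.mem_append.1 hb with hb | hb
      · rw [hval, hrec b hb, Prod.Lex.toLex_lt_toLex]
        exact Or.inl (by omega)
      · rw [hval, hrest b hb, Prod.Lex.toLex_lt_toLex]
        exact Or.inl (by omega)

-- ===== VERDICT (by name: the statement is the Claim_ definition above) =====
theorem ordered_keys_ds_py_spec : Claim_equal_ordered_keys_ds_py := by
  intro ds _
  unfold Spec_ordered_keys_ds_py
  simp only [ordered_keys_ds_py, ordered_keys_ds_py_alt]
  exact main_eq _ (PySem.Dict.nodup_keys_ofList ds)
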